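-- pv_equiv track=rewrite | github.com/jramaswami/Binary_Search_Python | paying_workers_with_coins.py | solve
-- ===== SOURCE A (Python) =====
-- def solve(coins, salaries):
--     MOD = pow(10, 9) + 7
--     coins.sort(reverse=True)
--     salaries.sort(reverse=True)
--     j = 0
--     soln = 1
--     for i, salary in enumerate(salaries):
--         # Move to a point where all coins to the left can
--         # be used to pay current salary.
--         while j < len(coins) and coins[j] >= salary:
--             j += 1
--
--         # There are j coins that can be used to pay the current
--         # salary.  We have already paid i previous employees.
--         # So, there are j - i coins left to pay current salary.
--         # First, make sure there are enough coins left to pay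
--         # the current salary.
--         if j - i <= 0:
--             return 0
--         # Pay current salary.
--         soln = (soln * (j - i)) % MOD
--     return soln
-- ===== SOURCE B (Python) =====
-- def solve(coins, salaries):
--     # Staged passes over ascending salaries with per-salary binary search, instead of
--     # A's single descending two-pointer sweep with early return.
--     # In-place descending sorts of both arguments kept (same side effect as A).
--     MOD = 10**9 + 7
--     coins.sort(reverse=True)
--     salaries.sort(reverse=True)
--     m = len(salaries)
--
--     def count_ge(s):
--         # number of coins >= s in the descending-sorted coins
--         lo, hi = 0, len(coins)
--         while lo < hi:
--             mid = (lo + hi) // 2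
--             if coins[mid] >= s:
--                 lo = mid + 1
--             else:
--                 hi = mid
--         return lo
--
--     factors = [count_ge(s) - (m - 1 - t) for t, s in enumerate(reversed(salaries))]
--     if any(f <= 0 for f in factors):
--         return 0
--     ans = 1
--     for f in factors:
--         ans = ans * f % MOD
--     return ans
-- ===== Notes on version B (the rewrite author's own statement) =====
-- stated objective: alternative
-- what changed: Replaces A's single stateful descending sweep (two-pointer j advanced inside the loop, early return) by staged passes: build the per-salary factor list by a hand-rolled binary search over the sorted coins while traversing salaries in ascending (reversed) order, then test all factors for positivity at once, then fold the modular product.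
import Mathlib
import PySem

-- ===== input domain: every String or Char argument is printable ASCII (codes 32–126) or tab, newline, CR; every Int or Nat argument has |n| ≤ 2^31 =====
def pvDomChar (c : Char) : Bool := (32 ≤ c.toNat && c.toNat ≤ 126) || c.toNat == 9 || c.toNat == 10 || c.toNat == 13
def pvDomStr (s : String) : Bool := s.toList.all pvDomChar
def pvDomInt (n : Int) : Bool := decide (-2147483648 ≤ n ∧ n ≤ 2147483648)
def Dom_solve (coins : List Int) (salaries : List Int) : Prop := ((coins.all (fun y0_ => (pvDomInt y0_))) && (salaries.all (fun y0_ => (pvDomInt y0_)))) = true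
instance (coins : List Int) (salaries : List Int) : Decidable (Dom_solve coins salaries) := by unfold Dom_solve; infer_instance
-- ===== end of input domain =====

-- B replaces A's stateful descending two-pointer sweep by staged passes (factor list built
-- over the reversed salaries, then a positivity test, then a modular product fold); both
-- sort both arguments descending in place exactly as A does (return-value equivalence).

-- ===== PORT A =====
-- the inner `while j < len(coins) and coins[j] >= salary: j += 1`
def solveWhile (coins : List Int) (salary : Int) (j : Nat) : Nat :=
  if h : j < coins.length then
    if salary ≤ coins[j] then solveWhile coins salary (j + 1) else j
  else j
termination_by coins.length - j
decreasing_by omega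

-- the `for i, salary in enumerate(salaries)` loop, carrying (i, j, soln)
def solveLoop (coins : List Int) (salaries : List Int) (i j : Nat) (soln : Int) : Int :=
  match salaries with
  | [] => soln
  | salary :: rest =>
    let j' := solveWhile coins salary j
    if (j' : Int) - (i : Int) ≤ 0 then 0
    else solveLoop coins rest (i + 1) j' (PySem.Int.mod (soln * ((j' : Int) - (i : Int))) 1000000007)

def solve (coins : List Int) (salaries : List Int) : Int :=
  solveLoop (PySem.List.sorted coins (fun x => x) true) (PySem.List.sorted salaries (fun x => x) true) 0 0 1

-- ===== PORT B =====
-- `count_ge`: binary search on the descending-sorted coins; throughout, lo ≤ mid < hi ≤ coins.length,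
-- so `coins[mid]` never raises and getD is exact; Nat `(lo+hi)/2` = Python's `(lo+hi)//2` on these Nats
def countGEsearch (coins : List Int) (s : Int) (lo hi : Nat) : Nat :=
  if _h : lo < hi then
    let mid := (lo + hi) / 2
    if s ≤ coins.getD mid 0 then countGEsearch coins s (mid + 1) hi
    else countGEsearch coins s lo mid
  else lo
termination_by hi - lo
decreasing_by all_goals omega

-- `for f in factors: ans = ans * f % MOD`
def prodModLoop (fs : List Int) (ans : Int) : Int :=
  match fs with
  | [] => ans
  | f :: rest => prodModLoop rest (PySem.Int.mod (ans * f) 1000000007)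

def solve_alt (coins : List Int) (salaries : List Int) : Int :=
  let cs := PySem.List.sorted coins (fun x => x) true
  let ss := PySem.List.sorted salaries (fun x => x) true
  let m : Int := ss.length
  let factors := (PySem.List.enumerate ss.reverse).map
      (fun ts => (countGEsearch cs ts.2 0 cs.length : Int) - (m - 1 - ts.1))
  if factors.any (fun f => decide (f ≤ 0)) then 0
  else prodModLoop factors 1

-- ===== PRECONDITION & SPEC =====
def Spec_solve (coins : List Int) (salaries : List Int) (out : Int) : Prop := out = solve_alt coins salaries
instance (coins : List Int) (salaries : List Int) (out : Int) : Decidable (Spec_solve coins salaries out) := by unfold Spec_solve; infer_instance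

-- ===== CLAIM (what is proved, stated in full; the proofs are below) =====
def Claim_equal_solve : Prop := ∀ (coins : List Int) (salaries : List Int), Dom_solve coins salaries → Spec_solve coins salaries (solve coins salaries)

-- ===== LEMMAS AND PROOFS =====

-- the number of coins ≥ salary (what B's binary search computes)
def countGE (coins : List Int) (salary : Int) : Nat :=
  coins.countP (fun c => decide (salary ≤ c))

-- the descending factor list: factor of the i-th (0-based, from offset i0) salary
def dfacs (cs : List Int) (S : List Int) (i : Nat) : List Int :=
  match S with
  | [] => []
  | s :: rest => ((countGE cs s : Int) - (i : Int)) :: dfacs cs rest (i + 1)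

-- abstract version of A's loop over the factor list
def specLoop (fs : List Int) (soln : Int) : Int :=
  match fs with
  | [] => soln
  | f :: rest => if f ≤ 0 then 0 else specLoop rest (PySem.Int.mod (soln * f) 1000000007)

theorem countGE_le_length (c : List Int) (s : Int) : countGE c s ≤ c.length :=
  List.countP_le_length

theorem countGE_cons_zero (a : Int) (t : List Int) (s : Int)
    (ha : ∀ x ∈ t, x ≤ a) (hsa : ¬ s ≤ a) : countGE (a :: t) s = 0 := by
  unfold countGE
  rw [List.countP_eq_zero]
  intro x hx
  simp only [decide_eq_true_eq]
  rcases List.mem_cons.mp hx with h | h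
  · omega
  · have := ha x h; omega

-- in a descending list, the coins ≥ salary form a prefix of length countGE
theorem countGE_prefix1 (cs : List Int) (hc : cs.Pairwise (fun a b => b ≤ a)) (s : Int) :
    ∀ i (hi : i < cs.length), i < countGE cs s → s ≤ cs[i]'hi := by
  induction cs with
  | nil => simp
  | cons a t ih =>
    have ha : ∀ x ∈ t, x ≤ a := fun x hx => (List.pairwise_cons.mp hc).1 x hx
    have ht := ih (List.pairwise_cons.mp hc).2
    intro i hi hcnt
    by_cases hsa : s ≤ a
    · cases i with
      | zero => simpa using hsa
      | succ n =>
        have hk : countGE (a :: t) s = countGE t s + 1 := by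
          simp [countGE, hsa]
        have hn : n < countGE t s := by omega
        simpa using ht n (by simpa using hi) hn
    · have h0 := countGE_cons_zero a t s ha hsa
      omega

theorem countGE_prefix2 (cs : List Int) (hc : cs.Pairwise (fun a b => b ≤ a)) (s : Int) :
    ∀ h : countGE cs s < cs.length, cs[countGE cs s]'h < s := by
  induction cs with
  | nil => simp
  | cons a t ih =>
    have ha : ∀ x ∈ t, x ≤ a := fun x hx => (List.pairwise_cons.mp hc).1 x hx
    have ht := ih (List.pairwise_cons.mp hc).2
    intro h
    by_cases hsa : s ≤ a
    · have hk : countGE (a :: t) s = countGE t s + 1 := by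
        simp [countGE, hsa]
      have h' : countGE t s < t.length := by
        rw [hk] at h; simpa using h
      have := ht h'
      have hget : (a :: t)[countGE (a :: t) s]'h = t[countGE t s]'h' := by
        simp [hk]
      rw [hget]
      exact this
    · have h0 := countGE_cons_zero a t s ha hsa
      have hget : (a :: t)[countGE (a :: t) s]'h = a := by simp [h0]
      rw [hget]
      omega

theorem solveWhile_eq (cs : List Int) (hc : cs.Pairwise (fun a b => b ≤ a)) (s : Int)
    (j : Nat) (hj : j ≤ countGE cs s) : solveWhile cs s j = countGE cs s := by
  have hlen := countGE_le_length cs s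
  induction hn : countGE cs s - j generalizing j with
  | zero =>
    have hjk : j = countGE cs s := by omega
    rw [solveWhile]
    subst hjk
    split
    · next hin =>
      rw [if_neg]
      have := countGE_prefix2 cs hc s hin
      omega
    · rfl
  | succ n ihn =>
    have hjlt : j < countGE cs s := by omega
    have hjc : j < cs.length := by omega
    have := countGE_prefix1 cs hc s j hjc hjlt
    rw [solveWhile, dif_pos hjc, if_pos this]
    exact ihn (j + 1) (by omega) (by omega)

theorem countGE_mono (cs : List Int) (s s' : Int) (h : s' ≤ s) : countGE cs s ≤ countGE cs s' := by
  unfold countGE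
  apply List.countP_mono_left
  intro a _ ha
  simp only [decide_eq_true_eq] at ha ⊢
  omega

theorem desc_le (cs : List Int) (hc : cs.Pairwise (fun a b => b ≤ a)) (i j : Nat)
    (hj : j < cs.length) (hi : i < cs.length) (hij : i ≤ j) : cs[j]'hj ≤ cs[i]'hi := by
  rcases Nat.lt_or_ge i j with h | h
  · exact (List.pairwise_iff_getElem.mp hc) i j hi hj h
  · have hieq : i = j := by omega
    subst hieq
    exact le_rfl

-- B's binary search computes countGE on a descending list
theorem search_eq (cs : List Int) (hc : cs.Pairwise (fun a b => b ≤ a)) (s : Int)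
    (lo hi : Nat) (h1 : lo ≤ countGE cs s) (h2 : countGE cs s ≤ hi) (h3 : hi ≤ cs.length) :
    countGEsearch cs s lo hi = countGE cs s := by
  obtain ⟨n, hn⟩ : ∃ n, hi - lo ≤ n := ⟨hi - lo, le_rfl⟩
  induction n generalizing lo hi with
  | zero =>
    rw [countGEsearch, dif_neg (by omega)]
    omega
  | succ n ihn =>
    by_cases hlt : lo < hi
    case neg =>
      rw [countGEsearch, dif_neg hlt]
      omega
    rw [countGEsearch, dif_pos hlt]
    have hmlt : (lo + hi) / 2 < hi := by omega
    have hmge : lo ≤ (lo + hi) / 2 := by omega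
    have hmlen : (lo + hi) / 2 < cs.length := by omega
    by_cases hcm : s ≤ cs.getD ((lo + hi) / 2) 0
    · rw [if_pos hcm]
      have hmid : (lo + hi) / 2 < countGE cs s := by
        by_contra hcon
        push Not at hcon
        have hcl : countGE cs s < cs.length := by omega
        have h4 := countGE_prefix2 cs hc s hcl
        have h5 := desc_le cs hc _ _ hmlen hcl hcon
        rw [List.getD_eq_getElem cs 0 hmlen] at hcm
        omega
      exact ihn _ _ hmid h2 h3 (by omega)
    · rw [if_neg hcm]
      have hmid : countGE cs s ≤ (lo + hi) / 2 := by
        by_contra hcon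
        push Not at hcon
        have := countGE_prefix1 cs hc s _ hmlen hcon
        rw [List.getD_eq_getElem cs 0 hmlen] at hcm
        omega
      exact ihn _ _ h1 hmid (by omega) (by omega)

-- A's loop computes specLoop of the descending factor list
theorem solveLoop_eq_specLoop (cs : List Int) (hc : cs.Pairwise (fun a b => b ≤ a)) :
    ∀ (S : List Int), S.Pairwise (fun a b => b ≤ a) →
    ∀ (j i : Nat) (soln : Int), (∀ s ∈ S, j ≤ countGE cs s) →
    solveLoop cs S i j soln = specLoop (dfacs cs S i) soln := by
  intro S
  induction S with
  | nil => intro _ j i soln _; rfl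
  | cons s rest ih =>
    intro hS j i soln hbound
    have hj' : solveWhile cs s j = countGE cs s :=
      solveWhile_eq cs hc s j (hbound s (by simp))
    simp only [solveLoop, specLoop, dfacs, hj']
    split
    · rfl
    · exact ih (List.pairwise_cons.mp hS).2 _ _ _
        (fun s' hs' => countGE_mono cs s s' ((List.pairwise_cons.mp hS).1 s' hs'))

theorem emod_mul_left (x y M : Int) : x % M * y % M = x * y % M := by
  rw [Int.mul_emod, Int.emod_emod_of_dvd _ dvd_rfl, ← Int.mul_emod]

theorem pymod_pos (a : Int) : PySem.Int.mod a 1000000007 = a.emod 1000000007 :=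
  PySem.Int.mod_eq_emod_of_pos (by norm_num)

theorem prodModLoop_closed (fs : List Int) (a : Int) :
    prodModLoop fs a = if fs = [] then a else (a * fs.prod).emod 1000000007 := by
  induction fs generalizing a with
  | nil => rfl
  | cons f rest ih =>
    simp only [prodModLoop, ih, pymod_pos]
    rcases rest with _ | ⟨g, t⟩
    · simp
    · rw [if_neg (List.cons_ne_nil _ _), if_neg (List.cons_ne_nil _ _)]
      show ((a * f) % 1000000007 * (g :: t).prod) % 1000000007
        = (a * ((f :: g :: t).prod)) % 1000000007
      rw [emod_mul_left]
      simp [mul_assoc]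

theorem specLoop_closed (fs : List Int) (a : Int) :
    specLoop fs a = if fs.any (fun f => decide (f ≤ 0)) then 0 else prodModLoop fs a := by
  induction fs generalizing a with
  | nil => rfl
  | cons f rest ih =>
    simp only [specLoop, prodModLoop, List.any_cons, ih]
    by_cases hf : f ≤ 0 <;> simp [hf]

-- getElem characterization of dfacs
theorem dfacs_length (cs S : List Int) (i : Nat) : (dfacs cs S i).length = S.length := by
  induction S generalizing i with
  | nil => rfl
  | cons s rest ih => simp [dfacs, ih]

theorem dfacs_getElem (cs S : List Int) (i k : Nat) (hk : k < S.length) :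
    (dfacs cs S i)[k]'(by rw [dfacs_length]; exact hk)
      = (countGE cs (S[k]'hk) : Int) - ((i : Int) + k) := by
  induction S generalizing i k with
  | nil => simp at hk
  | cons s rest ih =>
    cases k with
    | zero => simp [dfacs]
    | succ n =>
      have := ih (i + 1) n (by simpa using hk)
      simp only [dfacs, List.getElem_cons_succ]
      rw [this]
      push_cast
      ring

-- B's factor list is exactly the reverse of A's descending factor list
theorem factors_eq_reverse (cs S : List Int) :
    ((PySem.List.enumerate S.reverse).map
      (fun ts => (countGE cs ts.2 : Int) - ((S.length : Int) - 1 - ts.1)))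
    = (dfacs cs S 0).reverse := by
  apply List.ext_getElem
  · simp [PySem.List.length_enumerate, dfacs_length]
  · intro k h1 h2
    have hk : k < S.length := by
      simpa [PySem.List.length_enumerate] using h1
    have hrev : k < S.reverse.length := by simpa using hk
    have henum : (PySem.List.enumerate S.reverse)[k]'(by simpa [PySem.List.length_enumerate] using hrev)
        = ((0 : Int) + k, S.reverse[k]'hrev) := by
      exact PySem.List.getElem_enumerate ..
    have hk' : S.length - 1 - k < S.length := by omega
    have hgr : S.reverse[k]'hrev = S[S.length - 1 - k]'hk' := by
      rw [List.getElem_reverse]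
    have hdr : (dfacs cs S 0).reverse[k]'h2
        = (dfacs cs S 0)[S.length - 1 - k]'(by rw [dfacs_length]; omega) := by
      rw [List.getElem_reverse]; congr 1; rw [dfacs_length]
    rw [List.getElem_map, henum, hdr, dfacs_getElem _ _ _ _ hk']
    simp only [hgr]
    congr 1
    push_cast [Nat.cast_sub (by omega : 1 + k ≤ S.length)]
    omega

theorem any_reverse_eq (fs : List Int) :
    fs.reverse.any (fun f => decide (f ≤ 0)) = fs.any (fun f => decide (f ≤ 0)) := by
  simp

-- ===== VERDICT (by name: the statement is the Claim_ definition above) =====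
theorem solve_spec : Claim_equal_solve := by
  intro coins salaries _
  unfold Spec_solve solve solve_alt
  simp only []
  have hcs := PySem.List.sorted_pairwise_rev (xs := coins) (key := fun x => x)
  have hfun : ∀ s, countGEsearch (PySem.List.sorted coins (fun x => x) true) s 0
      (PySem.List.sorted coins (fun x => x) true).length
      = countGE (PySem.List.sorted coins (fun x => x) true) s :=
    fun s => search_eq _ hcs s 0 _ (Nat.zero_le _) (countGE_le_length _ _) le_rfl
  simp only [hfun]
  rw [solveLoop_eq_specLoop _ (PySem.List.sorted_pairwise_rev (xs := coins) (key := fun x => x))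
    _ (PySem.List.sorted_pairwise_rev (xs := salaries) (key := fun x => x))
    0 0 1 (fun _ _ => Nat.zero_le _)]
  rw [factors_eq_reverse, specLoop_closed, any_reverse_eq]
  by_cases hany : (dfacs (PySem.List.sorted coins (fun x => x) true)
      (PySem.List.sorted salaries (fun x => x) true) 0).any (fun f => decide (f ≤ 0))
  · simp [hany]
  · simp only [hany, Bool.false_eq_true, if_false]
    rw [prodModLoop_closed, prodModLoop_closed]
    simp [List.prod_reverse]
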